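-- pv_equiv track=rewrite | github.com/ankitdev33/ce-ar-timing | p1.py | clean_sheet_name
-- ===== SOURCE A (Python) =====
-- def clean_sheet_name(name):
--     """
--     Clean the row label to make it a valid Excel sheet name.
--     Excel sheet names cannot contain: \ / ? * [ ]
--     Also limit length to 31 characters (Excel limitation)
--     """
--     # Replace invalid characters with underscores
--     invalid_chars = ['\\', '/', '?', '*', '[', ']', ':', ';']
--     for char in invalid_chars:
--         name = str(name).replace(char, '_')
--
--     # Remove leading/trailing spaces and dots
--     name = name.strip('. ')
--
--     # Limit length to 31 characters
--     if len(name) > 31: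
--         name = name[:31]
--
--     # Ensure it's not empty
--     if not name:
--         name = "Sheet"
--
--     return name
-- ===== SOURCE B (Python) =====
-- def clean_sheet_name(name):
--     """Clean the row label to make it a valid Excel sheet name (single-pass version)."""
--     invalid = {'\\', '/', '?', '*', '[', ']', ':', ';'}
--     name = ''.join('_' if c in invalid else c for c in str(name))
--     name = name.strip('. ')
--     if len(name) > 31:
--         name = name[:31]
--     if not name:
--         name = "Sheet"
--     return name
-- ===== Notes on version B (the rewrite author's own statement) =====
-- stated objective: idiomatic
-- what changed: Replaces A's eight sequential str.replace scans of the whole string with a single pass over the characters using a set-membership test; strip, truncation and the empty default are unchanged.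
import Mathlib
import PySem

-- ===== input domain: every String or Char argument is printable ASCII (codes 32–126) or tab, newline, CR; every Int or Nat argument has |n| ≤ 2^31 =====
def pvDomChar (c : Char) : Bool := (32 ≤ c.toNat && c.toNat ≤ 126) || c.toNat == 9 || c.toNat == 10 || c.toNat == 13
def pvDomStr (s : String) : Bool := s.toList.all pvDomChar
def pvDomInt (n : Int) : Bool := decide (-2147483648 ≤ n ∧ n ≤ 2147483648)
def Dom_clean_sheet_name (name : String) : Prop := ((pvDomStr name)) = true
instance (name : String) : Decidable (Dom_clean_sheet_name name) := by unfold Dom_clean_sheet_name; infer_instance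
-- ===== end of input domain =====

-- B replaces A's eight sequential str.replace passes with one membership-tested pass over the characters.

-- ===== PORT A =====
def clean_sheet_name (name : String) : String :=
  let invalid_chars : List String := ["\\", "/", "?", "*", "[", "]", ":", ";"]
  let name := invalid_chars.foldl (fun n ch => PySem.Str.replace n ch "_") name
  let name := PySem.Str.stripChars name ". "
  let name := if PySem.Str.len name > 31 then PySem.Str.slice name none (some 31) else name
  if PySem.Str.len name = 0 then "Sheet" else name

-- ===== PORT B =====
def clean_sheet_name_alt (name : String) : String :=
  let invalid : PySem.Set Char := PySem.Set.ofList ['\\', '/', '?', '*', '[', ']', ':', ';']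
  let name := String.ofList (name.toList.map (fun c => if PySem.Set.contains invalid c then '_' else c))
  let name := PySem.Str.stripChars name ". "
  let name := if PySem.Str.len name > 31 then PySem.Str.slice name none (some 31) else name
  if PySem.Str.len name = 0 then "Sheet" else name

-- ===== PRECONDITION & SPEC =====
def Spec_clean_sheet_name (name : String) (out : String) : Prop := out = clean_sheet_name_alt name
instance (name : String) (out : String) : Decidable (Spec_clean_sheet_name name out) := by unfold Spec_clean_sheet_name; infer_instance

-- ===== CLAIM (what is proved, stated in full; the proofs are below) =====
def Claim_equal_clean_sheet_name : Prop := ∀ (name : String), Dom_clean_sheet_name name → Spec_clean_sheet_name name (clean_sheet_name name)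

-- ===== LEMMAS AND PROOFS =====

-- replacing the single character o by '_' is a per-character map (loop invariant of Chars.replace.go)
theorem replace_go_single (o : Char) : ∀ (l : List Char) (acc : List Char) (fuel : Nat),
    l.length ≤ fuel →
    PySem.Chars.replace.go [o] ['_'] fuel l acc
      = acc.reverse ++ l.map (fun c => if c = o then '_' else c) := by
  intro l
  induction l with
  | nil =>
    intro acc fuel _
    cases fuel <;> simp [PySem.Chars.replace.go]
  | cons c t ih =>
    intro acc fuel hf
    cases fuel with
    | zero => simp at hf
    | succ f =>
      simp only [PySem.Chars.replace.go, List.isPrefixOf, List.map]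
      by_cases hc : c = o
      · simp [hc, ih ('_' :: acc) f (by simpa using hf)]
      · simp [Ne.symm hc, hc, ih (c :: acc) f (by simpa using hf)]

theorem replace_single (s : List Char) (o : Char) :
    PySem.Chars.replace s [o] ['_'] = s.map (fun c => if c = o then '_' else c) := by
  simp [PySem.Chars.replace, replace_go_single o s [] s.length le_rfl]

theorem str_replace_single (s : String) (o : Char) :
    PySem.Str.replace s (String.ofList [o]) "_"
      = String.ofList (s.toList.map (fun c => if c = o then '_' else c)) := by
  simp [PySem.Str.replace, replace_single]

-- the eight replace passes of A equal B's single membership-tested map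
set_option maxHeartbeats 2000000 in
theorem stage1_eq (s : String) :
    (["\\", "/", "?", "*", "[", "]", ":", ";"].foldl
        (fun n ch => PySem.Str.replace n ch "_") s)
      = String.ofList (s.toList.map (fun c =>
          if PySem.Set.contains (PySem.Set.ofList ['\\', '/', '?', '*', '[', ']', ':', ';']) c
          then '_' else c)) := by
  simp only [List.foldl]
  rw [show ("\\" : String) = String.ofList ['\\'] from rfl,
      show ("/" : String) = String.ofList ['/'] from rfl,
      show ("?" : String) = String.ofList ['?'] from rfl,
      show ("*" : String) = String.ofList ['*'] from rfl,
      show ("[" : String) = String.ofList ['['] from rfl,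
      show ("]" : String) = String.ofList [']'] from rfl,
      show (":" : String) = String.ofList [':'] from rfl,
      show (";" : String) = String.ofList [';'] from rfl]
  simp only [str_replace_single, String.toList_ofList, List.map_map]
  have hset : PySem.Set.ofList ['\\', '/', '?', '*', '[', ']', ':', ';']
      = ['\\', '/', '?', '*', '[', ']', ':', ';'] := by decide
  rw [hset]
  apply congrArg String.ofList
  apply List.map_congr_left
  intro c _
  by_cases h1 : c = '\\'
  · subst h1; simp [PySem.Set.contains]
  by_cases h2 : c = '/'
  · subst h2; simp [PySem.Set.contains]
  by_cases h3 : c = '?'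
  · subst h3; simp [PySem.Set.contains]
  by_cases h4 : c = '*'
  · subst h4; simp [PySem.Set.contains]
  by_cases h5 : c = '['
  · subst h5; simp [PySem.Set.contains]
  by_cases h6 : c = ']'
  · subst h6; simp [PySem.Set.contains]
  by_cases h7 : c = ':'
  · subst h7; simp [PySem.Set.contains]
  by_cases h8 : c = ';'
  · subst h8; simp [PySem.Set.contains]
  simp [h1, h2, h3, h4, h5, h6, h7, h8, PySem.Set.contains]

-- ===== VERDICT (by name: the statement is the Claim_ definition above) =====
theorem clean_sheet_name_spec : Claim_equal_clean_sheet_name := by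
  intro name _
  simp only [Spec_clean_sheet_name, clean_sheet_name, clean_sheet_name_alt, stage1_eq]
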